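-- pv_equiv track=rewrite | github.com/mohemish9/moemish.com | code projects/text compression/text_compress.py | makebits
-- ===== SOURCE A (Python) =====
-- def makebits(string):
--     """ chunks a given string of 0s and 1s into 8-bit number
--         input: string, a long string of 0s and 1s
--         output: a list of 8-bits numbers that represents 8-bit chucks of the input string
--     """
--     output=[]
--     while len(string)>8:
--         number = BinaryToNum(string[:8])
--         output.append(number)
--         string = string[8:]
--     if len(string) != 0:
--         number = BinaryToNum(string)
--         output.append(number)
--     return output
--
-- def BinaryToNum(string):
--     """ converts binary number to 8-bit number
--         input: string, an 8-bit long binary number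
--         output: 8-bit number representing the input
--     """
--     answer = 0
--     for x in string:
--         answer = answer * 2
--         if x == "1":
--             answer = answer + 1
--     return answer
-- ===== SOURCE B (Python) =====
-- def makebits(string):
--     """ chunks a given string of 0s and 1s into 8-bit numbers
--         single streaming pass: no slicing, no per-chunk helper """
--     output = []
--     value = 0
--     count = 0
--     for x in string:
--         value = value * 2 + (1 if x == "1" else 0)
--         count += 1
--         if count == 8:
--             output.append(value)
--             value = 0
--             count = 0
--     if count != 0:
--         output.append(value)
--     return output
-- ===== Notes on version B (the rewrite author's own statement) =====
-- stated objective: faster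
-- what changed: Replaces the slice-8/convert/re-slice loop with its per-chunk helper by a single streaming pass that accumulates each bit into a running value and flushes it every 8 characters.
import Mathlib
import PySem

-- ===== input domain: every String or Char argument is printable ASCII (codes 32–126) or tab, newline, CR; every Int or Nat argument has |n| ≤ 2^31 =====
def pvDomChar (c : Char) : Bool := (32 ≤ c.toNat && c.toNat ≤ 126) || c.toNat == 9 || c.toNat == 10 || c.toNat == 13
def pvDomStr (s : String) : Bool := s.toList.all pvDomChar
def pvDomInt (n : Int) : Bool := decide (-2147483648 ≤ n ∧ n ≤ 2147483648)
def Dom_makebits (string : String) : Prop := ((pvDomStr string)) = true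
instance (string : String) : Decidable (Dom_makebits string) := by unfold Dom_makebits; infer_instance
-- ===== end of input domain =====

-- B replaces A's slice-8/per-chunk-helper loop by one streaming pass with a value/count accumulator (simpler, no slicing).

-- ===== PORT A =====
-- helper BinaryToNum: answer = 0; for x: answer *= 2; if x == "1": answer += 1
def binaryToNum (l : List Char) : Int :=
  l.foldl (fun answer x => if x == '1' then answer * 2 + 1 else answer * 2) 0

-- while len(string) > 8: take string[:8], append, string = string[8:]; then the ≤8 leftover.
-- (string[:8]/string[8:] with nonnegative in-range bounds are exactly List.take/List.drop)
def makebitsLoop (s : List Char) (output : List Int) : List Int :=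
  if 8 < s.length then
    makebitsLoop (s.drop 8) (output ++ [binaryToNum (s.take 8)])
  else if s.length ≠ 0 then output ++ [binaryToNum s]
  else output
termination_by s.length
decreasing_by simp [List.length_drop]; omega

def makebits (string : String) : List Int := makebitsLoop string.toList []

-- ===== PORT B =====
-- one streaming pass: state (value, count, output); flush when count reaches 8
def bstep (st : Int × Int × List Int) (x : Char) : Int × Int × List Int :=
  let value := st.1 * 2 + (if x == '1' then 1 else 0)
  let count := st.2.1 + 1
  if count == 8 then (0, 0, st.2.2 ++ [value]) else (value, count, st.2.2)

def makebits_alt (string : String) : List Int :=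
  let st := string.toList.foldl bstep (0, 0, [])
  if st.2.1 ≠ 0 then st.2.2 ++ [st.1] else st.2.2

-- ===== PRECONDITION & SPEC =====
def Spec_makebits (string : String) (out : List Int) : Prop := out = makebits_alt string
instance (string : String) (out : List Int) : Decidable (Spec_makebits string out) := by unfold Spec_makebits; infer_instance

-- ===== CLAIM (what is proved, stated in full; the proofs are below) =====
def Claim_equal_makebits : Prop := ∀ (string : String), Dom_makebits string → Spec_makebits string (makebits string)

-- ===== LEMMAS AND PROOFS =====

-- A's per-char update equals B's
lemma step_eq (a : Int) (x : Char) :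
    a * 2 + (if x == '1' then 1 else 0) = (if x == '1' then a * 2 + 1 else a * 2) := by
  split <;> ring

-- invariant of B's fold while a chunk is in progress (count c, value v, nothing flushed yet)
lemma bfold_inv : ∀ (l : List Char) (v c : Int) (out : List Int), 0 ≤ c →
    c + l.length ≤ 8 → l ≠ [] →
    l.foldl bstep (v, c, out) =
      if c + l.length = 8 then
        ((0 : Int), (0 : Int), out ++ [l.foldl (fun answer x => if x == '1' then answer * 2 + 1 else answer * 2) v])
      else (l.foldl (fun answer x => if x == '1' then answer * 2 + 1 else answer * 2) v,
            c + l.length, out) := by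
  intro l
  induction l with
  | nil => intro _ _ _ _ _ hne; exact absurd rfl hne
  | cons x l ih =>
    intro v c out hc hlen _
    simp only [List.foldl_cons]
    by_cases h8 : c + 1 = 8
    · have hl0 : l = [] := by
        have : l.length = 0 := by simp at hlen; omega
        exact List.length_eq_zero_iff.mp this
      subst hl0
      simp [bstep, h8]
      split <;> ring
    · rcases eq_or_ne l [] with hl0 | hl0
      · subst hl0
        simp [bstep, h8]
        split <;> ring
      · have hstep : bstep (v, c, out) x = (v * 2 + (if x == '1' then 1 else 0), c + 1, out) := by
          simp [bstep, h8]
        rw [hstep, ih _ (c + 1) out (by omega) (by simp at hlen ⊢; omega) hl0]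
        rw [step_eq]
        have hcast : c + 1 + (l.length : Int) = c + ((x :: l).length : Int) := by
          simp only [List.length_cons]; push_cast; ring
        rw [hcast]

-- B's fold on a list of ≤ 8 chars, starting from a flushed state
lemma bfold_le8 (l : List Char) (out : List Int) (h : l.length ≤ 8) :
    l.foldl bstep (0, 0, out) =
      if l.length = 8 then ((0 : Int), (0 : Int), out ++ [binaryToNum l])
      else (binaryToNum l, (l.length : Int), out) := by
  rcases eq_or_ne l [] with hl0 | hl0
  · subst hl0; simp [binaryToNum]
  · have hinv := bfold_inv l 0 0 out le_rfl (by omega) hl0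
    rw [hinv]
    unfold binaryToNum
    by_cases h8 : l.length = 8
    · simp [h8]
    · have h8' : ¬ ((0 : Int) + (l.length : Int) = 8) := by omega
      rw [if_neg h8', if_neg h8]
      simp

-- main loop correspondence, by strong induction on the length
lemma loop_eq : ∀ (n : Nat) (l : List Char), l.length ≤ n → ∀ (out : List Int),
    makebitsLoop l out =
      (let st := l.foldl bstep (0, 0, out)
       if st.2.1 ≠ 0 then st.2.2 ++ [st.1] else st.2.2) := by
  intro n
  induction n with
  | zero =>
    intro l hl out
    have : l = [] := List.length_eq_zero_iff.mp (Nat.le_zero.mp hl)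
    subst this
    simp [makebitsLoop]
  | succ n ih =>
    intro l hl out
    by_cases hbig : 8 < l.length
    · rw [makebitsLoop]
      simp only [hbig, if_pos]
      have hsplit : l = l.take 8 ++ l.drop 8 := (List.take_append_drop 8 l).symm
      have htk : (l.take 8).length = 8 := by simp; omega
      have hrec := ih (l.drop 8) (by simp [List.length_drop]; omega)
        (out ++ [binaryToNum (l.take 8)])
      rw [hrec]
      have hfold : l.foldl bstep ((0 : Int), (0 : Int), out) =
          (l.drop 8).foldl bstep ((0 : Int), (0 : Int), out ++ [binaryToNum (l.take 8)]) := by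
        conv_lhs => rw [hsplit]
        rw [List.foldl_append, bfold_le8 _ _ (le_of_eq htk), htk]
        simp
      rw [hfold]
    · rw [makebitsLoop]
      simp only [hbig, if_neg, not_false_iff]
      have hle : l.length ≤ 8 := by omega
      rw [bfold_le8 l out hle]
      by_cases h8 : l.length = 8
      · simp [h8]
      · by_cases h0 : l.length = 0
        · have : l = [] := List.length_eq_zero_iff.mp h0
          subst this; simp
        · simp [h8, h0]

-- ===== VERDICT (by name: the statement is the Claim_ definition above) =====
theorem makebits_spec : Claim_equal_makebits := by
  intro s _
  unfold Spec_makebits makebits makebits_alt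
  exact loop_eq s.toList.length s.toList le_rfl []
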